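-- pv_equiv track=rewrite | github.com/tonyandrewmeyer/cascade | src/pebble_shell/commands/user_management/addgroup.py | _find_available_gid
-- ===== SOURCE A (Python) =====
-- def _find_available_gid(group_content: str, system_group: bool) -> int:
--     """Find next available GID."""
--     used_gids = set()
--
--     for line in group_content.strip().split("\n"):
--         if line and len(line.split(":")) >= 3:
--             try:
--                 gid = int(line.split(":")[2])
--                 used_gids.add(gid)
--             except ValueError:
--                 continue
--
--     # System groups: 100-999, regular groups: 1000+
--     start_gid = 100 if system_group else 1000
--     max_gid = 999 if system_group else 65534
--
--     for gid in range(start_gid, max_gid + 1):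
--         if gid not in used_gids:
--             return gid
--
--     raise Exception(f"No available GID in range {start_gid}-{max_gid}")
-- ===== SOURCE B (Python) =====
-- def _find_available_gid(group_content: str, system_group: bool) -> int:
--     """Find next available GID via a sorted single pass over used GIDs."""
--     start_gid, max_gid = (100, 999) if system_group else (1000, 65534)
--
--     used_gids = set()
--     for line in group_content.strip().split("\n"):
--         parts = line.split(":")
--         if line and len(parts) >= 3:
--             try:
--                 used_gids.add(int(parts[2]))
--             except ValueError:
--                 pass
--
--     candidate = start_gid
--     for gid in sorted(g for g in used_gids if start_gid <= g <= max_gid):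
--         if gid < candidate:
--             continue
--         if gid == candidate:
--             candidate += 1
--         else:
--             break
--
--     if candidate <= max_gid:
--         return candidate
--     raise Exception(f"No available GID in range {start_gid}-{max_gid}")
-- ===== Notes on version B (the rewrite author's own statement) =====
-- stated objective: alternative
-- what changed: A scans every GID of the fixed range (900 or 64535 candidates) testing each against the used-GID set; B instead sorts the in-range used GIDs once and finds the first gap with a single candidate walk over that sorted list, so the work is proportional to the number of used GIDs rather than to the range size.
import Mathlib
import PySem

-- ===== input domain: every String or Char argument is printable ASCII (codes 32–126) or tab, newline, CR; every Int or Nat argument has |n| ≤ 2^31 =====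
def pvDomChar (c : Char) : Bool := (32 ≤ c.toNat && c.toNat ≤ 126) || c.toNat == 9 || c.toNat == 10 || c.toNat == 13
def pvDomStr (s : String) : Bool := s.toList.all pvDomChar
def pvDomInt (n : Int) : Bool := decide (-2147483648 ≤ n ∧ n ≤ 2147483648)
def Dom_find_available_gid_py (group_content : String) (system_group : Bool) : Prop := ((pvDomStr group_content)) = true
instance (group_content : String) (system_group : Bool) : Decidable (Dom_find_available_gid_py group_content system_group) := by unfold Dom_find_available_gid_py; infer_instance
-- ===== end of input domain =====

-- B replaces A's scan of the whole fixed GID range against a set by a single candidate walk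
-- over the sorted in-range used GIDs (objective: alternative algorithm, similar cost here).
-- Pre_ excludes exactly the inputs on which A raises Exception («No available GID in range …»),
-- i.e. those where every GID of the fixed range is used; B raises the identical Exception there.


-- ===== PORT A =====
-- shared with the port of B: both Pythons parse group_content with this identical loop
-- (group_content.strip().split("\n"); lines with >= 3 ":"-fields contribute int(field[2]) to a set)
def gidLines (group_content : String) : List String :=
  (PySem.Str.split? (PySem.Str.strip group_content) "\n").getD []   -- sep "\n" ≠ "": split? is some

def gidStep (s : PySem.Set Int) (line : String) : PySem.Set Int :=
  if line ≠ "" ∧ 3 ≤ ((PySem.Str.split? line ":").getD []).length then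
    match PySem.Int.ofStr? (PySem.List.pyGetD ((PySem.Str.split? line ":").getD []) 2 "") with
    | some gid => PySem.Set.add s gid       -- used_gids.add(gid)
    | none => s                              -- except ValueError: continue
  else s

def find_available_gid_py (group_content : String) (system_group : Bool) : Int :=
  let used_gids : PySem.Set Int := (gidLines group_content).foldl gidStep PySem.Set.empty
  let start_gid : Int := if system_group then 100 else 1000
  let max_gid : Int := if system_group then 999 else 65534
  -- for gid in range(start_gid, max_gid + 1): if gid not in used_gids: return gid
  (((PySem.List.pyRange start_gid (max_gid + 1) 1).find?
      (fun gid => !(PySem.Set.contains used_gids gid))).getD (-1))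
  -- .getD (-1) is the 'raise Exception' branch, excluded by Pre_

-- ===== PORT B =====
def gidWalk (cand : Int) : List Int → Int
  | [] => cand
  | gid :: rest =>
      if gid < cand then gidWalk cand rest           -- continue
      else if gid = cand then gidWalk (cand + 1) rest
      else cand                                      -- break

def find_available_gid_py_alt (group_content : String) (system_group : Bool) : Int :=
  let start_gid : Int := if system_group then 100 else 1000
  let max_gid : Int := if system_group then 999 else 65534
  let used_gids : PySem.Set Int := (gidLines group_content).foldl gidStep PySem.Set.empty
  -- for gid in sorted(g for g in used_gids if start_gid <= g <= max_gid): candidate walk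
  let cand := gidWalk start_gid
    (PySem.List.sorted (used_gids.filter (fun g => decide (start_gid ≤ g ∧ g ≤ max_gid)))
      (fun x => x) false)
  if cand ≤ max_gid then cand else -1   -- else branch is the 'raise Exception', excluded by Pre_

-- ===== PRECONDITION & SPEC =====
-- declarative statement of the parse (used only by Pre_; membership-equal to the ports' fold)
def preGids (group_content : String) : List Int :=
  (gidLines group_content).filterMap (fun line =>
    if line ≠ "" ∧ 3 ≤ ((PySem.Str.split? line ":").getD []).length then
      PySem.Int.ofStr? (PySem.List.pyGetD ((PySem.Str.split? line ":").getD []) 2 "")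
    else none)

-- Pre_ holds exactly when A returns: by pigeonhole, some GID of the fixed range is unused iff
-- the distinct in-range used GIDs number fewer than the range's slots (they can never exceed it);
-- on the excluded inputs every range GID is used and A raises Exception «No available GID in
-- range …», B raising the identical Exception there.
def Pre_find_available_gid_py (group_content : String) (system_group : Bool) : Prop :=
  ((((PySem.List.dedup (preGids group_content)).filter
      (fun g => decide ((if system_group then (100:Int) else 1000) ≤ g ∧
                        g ≤ (if system_group then 999 else 65534)))).length : Int)
    < (if system_group then (999:Int) else 65534) + 1 - (if system_group then 100 else 1000))
instance (group_content : String) (system_group : Bool) : Decidable (Pre_find_available_gid_py group_content system_group) := by unfold Pre_find_available_gid_py; infer_instance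

def pvWitness_find_available_gid_py : String × Bool := ("root:x:0:\nusers:x:1000:", false)

def Spec_find_available_gid_py (group_content : String) (system_group : Bool) (out : Int) : Prop := out = find_available_gid_py_alt group_content system_group
instance (group_content : String) (system_group : Bool) (out : Int) : Decidable (Spec_find_available_gid_py group_content system_group out) := by unfold Spec_find_available_gid_py; infer_instance

-- ===== CLAIM (what is proved, stated in full; the proofs are below) =====
def Claim_equal_find_available_gid_py : Prop := ∀ (group_content : String) (system_group : Bool), Dom_find_available_gid_py group_content system_group → Pre_find_available_gid_py group_content system_group → Spec_find_available_gid_py group_content system_group (find_available_gid_py group_content system_group)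

-- ===== LEMMAS AND PROOFS =====

-- the parsing fold keeps the set Nodup
theorem gidFold_nodup (lines : List String) (s : PySem.Set Int) (hs : s.Nodup) :
    (lines.foldl gidStep s).Nodup := by
  induction lines generalizing s with
  | nil => exact hs
  | cons l t ih =>
      refine ih _ ?_
      unfold gidStep
      split
      · split
        · exact PySem.Set.nodup_add _ _ hs
        · exact hs
      · exact hs

-- membership in the parsing fold = membership in the declarative filterMap parse
theorem gidFold_mem (lines : List String) (s : PySem.Set Int) (x : Int) :
    x ∈ lines.foldl gidStep s ↔ x ∈ s ∨
      x ∈ lines.filterMap (fun line =>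
        if line ≠ "" ∧ 3 ≤ ((PySem.Str.split? line ":").getD []).length then
          PySem.Int.ofStr? (PySem.List.pyGetD ((PySem.Str.split? line ":").getD []) 2 "")
        else none) := by
  induction lines generalizing s with
  | nil => simp
  | cons l t ih =>
      simp only [List.foldl_cons, List.filterMap_cons]
      rw [ih]
      unfold gidStep
      split
      · cases hof : PySem.Int.ofStr? (PySem.List.pyGetD ((PySem.Str.split? l ":").getD []) 2 "") with
        | some gid => simp [PySem.Set.mem_add, or_assoc, or_comm (a := x = gid)]
        | none => simp
      · simp

-- candidate walk over a strictly increasing list: result is the least value ≥ cand not in the list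
theorem gidWalk_spec (L : List Int) (hL : L.Pairwise (· < ·)) :
    ∀ cand : Int, cand ≤ gidWalk cand L ∧ gidWalk cand L ∉ L ∧
      (∀ m : Int, cand ≤ m → m < gidWalk cand L → m ∈ L) := by
  induction L with
  | nil =>
      intro c
      refine ⟨le_refl c, by simp [gidWalk], ?_⟩
      intro m h1 h2
      simp only [gidWalk] at h2
      exact absurd h2 (by omega)
  | cons g rest ih =>
      rcases List.pairwise_cons.mp hL with ⟨hg, hrest⟩
      intro c
      by_cases h1 : g < c
      · have := ih hrest c
        simp only [gidWalk, if_pos h1]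
        refine ⟨this.1, ?_, ?_⟩
        · simp only [List.mem_cons, not_or]
          exact ⟨by omega, this.2.1⟩
        · intro m hm1 hm2; exact List.mem_cons_of_mem _ (this.2.2 m hm1 hm2)
      · by_cases h2 : g = c
        · have := ih hrest (c + 1)
          simp only [gidWalk, if_neg h1, if_pos h2]
          refine ⟨by omega, ?_, ?_⟩
          · simp only [List.mem_cons, not_or]
            constructor
            · omega
            · exact this.2.1
          · intro m hm1 hm2
            by_cases hmc : m = c
            · exact List.mem_cons.mpr (Or.inl (by omega))
            · exact List.mem_cons_of_mem _ (this.2.2 m (by omega) hm2)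
        · simp only [gidWalk, if_neg h1, if_neg h2]
          refine ⟨le_refl c, ?_, ?_⟩
          · simp only [List.mem_cons, not_or]
            refine ⟨by omega, fun hc => ?_⟩
            have := hg c hc; omega
          · intro m hm1 hm2; omega

-- find? over range(a, b) returns the least w in [a, b) satisfying p
theorem find?_pyRange_eq_some_aux (p : Int → Bool) (b w : Int) (hb : w < b) (hp : p w = true) :
    ∀ (n : Nat) (a : Int), (w - a).toNat = n → a ≤ w →
      (∀ m : Int, a ≤ m → m < w → p m = false) →
      ((PySem.List.pyRange a b 1).find? p) = some w := by
  intro n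
  induction n with
  | zero =>
      intro a hn h1 _
      have haw : a = w := by omega
      subst haw
      rw [PySem.List.pyRange_one_cons (by omega)]
      simp [List.find?, hp]
  | succ n ih =>
      intro a hn h1 hmin
      have haw : a < w := by omega
      rw [PySem.List.pyRange_one_cons (by omega)]
      have hpa : p a = false := hmin a (le_refl a) haw
      simp only [List.find?, hpa]
      exact ih (a + 1) (by omega) (by omega) (fun m hm1 hm2 => hmin m (by omega) hm2)

theorem find?_pyRange_eq_some (p : Int → Bool) (b w a : Int) (h1 : a ≤ w) (h2 : w < b)
    (hp : p w = true) (hmin : ∀ m : Int, a ≤ m → m < w → p m = false) :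
    ((PySem.List.pyRange a b 1).find? p) = some w :=
  find?_pyRange_eq_some_aux p b w h2 hp (w - a).toNat a rfl h1 hmin

theorem find_available_gid_py_main (S : List Int) (hS : S.Nodup) (start_gid max_gid : Int)
    (hfree : ∃ g : Int, start_gid ≤ g ∧ g ≤ max_gid ∧ g ∉ S) :
    ((PySem.List.pyRange start_gid (max_gid + 1) 1).find?
        (fun gid => !(PySem.Set.contains S gid))).getD (-1)
      = (let cand := gidWalk start_gid
            (PySem.List.sorted (S.filter (fun g => decide (start_gid ≤ g ∧ g ≤ max_gid)))
              (fun x => x) false);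
         if cand ≤ max_gid then cand else -1) := by
  set F := S.filter (fun g => decide (start_gid ≤ g ∧ g ≤ max_gid)) with hF
  set L := PySem.List.sorted F (fun x => x) false with hLdef
  have hperm : L.Perm F := PySem.List.sorted_perm _ _ _
  have hmemL : ∀ x : Int, x ∈ L ↔ (x ∈ S ∧ start_gid ≤ x ∧ x ≤ max_gid) := by
    intro x
    rw [hperm.mem_iff, hF, List.mem_filter]
    simp
  have hLnodup : L.Nodup := hperm.nodup_iff.mpr (hS.filter _)
  have hLlt : L.Pairwise (· < ·) := by
    have hle : L.Pairwise (· ≤ ·) := by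
      have := PySem.List.sorted_pairwise F (fun x : Int => x)
      simpa using this
    have := hle.and hLnodup
    exact this.imp (by rintro a b ⟨h1, h2⟩; omega)
  obtain ⟨gf, hgf1, hgf2, hgf3⟩ := hfree
  obtain ⟨hw1, hw2, hw3⟩ := gidWalk_spec L hLlt start_gid
  set w := gidWalk start_gid L with hwdef
  have hwle : w ≤ max_gid := by
    by_contra hcon
    push Not at hcon
    have : gf ∈ L := hw3 gf hgf1 (by omega)
    exact hgf3 ((hmemL gf).mp this).1
  have hwS : w ∉ S := fun hmem => hw2 ((hmemL w).mpr ⟨hmem, hw1, hwle⟩)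
  have hfind : ((PySem.List.pyRange start_gid (max_gid + 1) 1).find?
      (fun gid => !(PySem.Set.contains S gid))) = some w := by
    apply find?_pyRange_eq_some _ _ _ _ hw1 (by omega)
    · simpa using hwS
    · intro m hm1 hm2
      have : m ∈ S := ((hmemL m).mp (hw3 m hm1 hm2)).1
      simpa using this
  rw [hfind]
  simp only [Option.getD_some]
  rw [if_pos hwle]

-- a Nodup list contained in another list is no longer than it
theorem pv_nodup_subset_length (l1 l2 : List Int) (h : l1.Nodup) (hs : l1 ⊆ l2) :
    l1.length ≤ l2.length := by
  calc l1.length = l1.toFinset.card := (List.toFinset_card_of_nodup h).symm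
    _ ≤ l2.toFinset.card :=
        Finset.card_le_card (fun x hx => List.mem_toFinset.mpr (hs (List.mem_toFinset.mp hx)))
    _ ≤ l2.length := List.toFinset_card_le l2

-- Pre_ gives a free gid in the range, by pigeonhole
theorem pv_free_gid (gc : String) (start_gid max_gid : Int)
    (hlen : (((PySem.List.dedup (preGids gc)).filter
        (fun g => decide (start_gid ≤ g ∧ g ≤ max_gid))).length : Int)
      < max_gid + 1 - start_gid) :
    ∃ g : Int, start_gid ≤ g ∧ g ≤ max_gid ∧
      g ∉ (gidLines gc).foldl gidStep PySem.Set.empty := by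
  by_contra hcon
  push Not at hcon
  have hmemS : ∀ x : Int, x ∈ (gidLines gc).foldl gidStep PySem.Set.empty ↔ x ∈ preGids gc := by
    intro x
    rw [gidFold_mem]
    simp [PySem.Set.empty, preGids]
  have hsub : PySem.List.pyRange start_gid (max_gid + 1) 1 ⊆
      (PySem.List.dedup (preGids gc)).filter
        (fun g => decide (start_gid ≤ g ∧ g ≤ max_gid)) := by
    intro g hg
    rw [PySem.List.mem_pyRange_one] at hg
    rw [List.mem_filter]
    refine ⟨?_, by simp; omega⟩
    rw [PySem.List.mem_dedup]
    exact (hmemS g).mp (hcon g hg.1 (by omega))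
  have hnR := PySem.List.nodup_pyRange_one (a := start_gid) (b := max_gid + 1)
  have hcard := pv_nodup_subset_length _ _ hnR hsub
  rw [PySem.List.length_pyRange_one] at hcard
  omega

-- ===== VERDICT (by name: the statement is the Claim_ definition above) =====
theorem find_available_gid_py_spec : Claim_equal_find_available_gid_py := by
  intro gc sg _ hpre
  unfold Spec_find_available_gid_py find_available_gid_py find_available_gid_py_alt
  have hnodup : ((gidLines gc).foldl gidStep PySem.Set.empty).Nodup :=
    gidFold_nodup _ _ List.nodup_nil
  unfold Pre_find_available_gid_py at hpre
  cases sg with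
  | false =>
      norm_num only at hpre ⊢
      simp only [Bool.false_eq_true, if_false] at hpre
      exact find_available_gid_py_main _ hnodup _ _ (pv_free_gid gc 1000 65534 (by push_cast; omega))
  | true =>
      norm_num only at hpre ⊢
      simp only [if_true] at hpre
      exact find_available_gid_py_main _ hnodup _ _ (pv_free_gid gc 100 999 (by push_cast; omega))
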